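-- pv_equiv track=rewrite | github.com/asilva111/CS2302_Lab_7 | drawMaze.py | prev_to_EL
-- ===== SOURCE A (Python) =====
-- def prev_to_EL(prev):
--     EL = [] #Create edge list
--
--     i = len(prev)-1 #Start from last node
--     while prev[i] >= 0: #While not reaching the end
--         if i < prev[i]: #Decide direction of line
--             edge = [i,prev[i]] #Create an edge form current index to prev[i]
--         else:
--             edge = [prev[i],i]
--
--         i = prev[i] #Update index to content of array
--         EL.append(edge) #append to edge list
--
--     EL.append([0,i]) #Finally, create a node with 0 to last known index
--
--     return EL
-- ===== SOURCE B (Python) =====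
-- def prev_to_EL(prev):
--     # Pass 1: push the chain nodes visited from the last index onto a stack.
--     stack = []
--     i = len(prev) - 1
--     while prev[i] >= 0:
--         stack.append(i)
--         i = prev[i]
--     # Pass 2: pop the stack, building the edge list back-to-front (terminal
--     # edge [0, i] first), re-reading prev for each popped node; then reverse.
--     rev = [[0, i]]
--     while stack:
--         j = stack.pop()
--         p = prev[j]
--         rev.append([min(j, p), max(j, p)])
--     rev.reverse()
--     return rev
-- ===== Notes on version B (the rewrite author's own statement) =====
-- stated objective: alternative
-- what changed: B replaces A's single inline forward walk by a stack-based two-pass scheme: pass 1 pushes the visited chain nodes on a stack, pass 2 pops them to build the edge list back-to-front (terminal edge first, re-reading prev and orienting edges with min/max), and a final reversal restores walk order.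
import Mathlib
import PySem

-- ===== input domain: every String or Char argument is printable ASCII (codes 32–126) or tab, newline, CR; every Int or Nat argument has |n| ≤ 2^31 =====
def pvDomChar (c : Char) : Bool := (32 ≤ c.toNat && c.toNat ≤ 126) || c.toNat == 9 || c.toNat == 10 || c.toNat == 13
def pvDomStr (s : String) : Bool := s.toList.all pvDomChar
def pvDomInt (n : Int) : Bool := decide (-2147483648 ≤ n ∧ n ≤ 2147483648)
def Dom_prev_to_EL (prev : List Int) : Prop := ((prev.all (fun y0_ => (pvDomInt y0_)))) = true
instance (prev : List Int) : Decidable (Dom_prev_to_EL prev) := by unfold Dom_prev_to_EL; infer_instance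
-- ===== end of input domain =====

-- B replaces A's inline forward walk by a stack-based two-pass scheme (push the chain,
-- then pop it building the output back-to-front and reverse); same cost ("alternative").

-- ===== PORT A =====
-- A's while loop: i descends along prev; fuel = prev.length suffices on Pre_ inputs
-- (see Pre_ below); out-of-fuel / IndexError branches are outside Pre_.
def prev_to_EL_go (prev : List Int) : Nat → Int → List (List Int) → List (List Int)
  | 0, i, el => el ++ [[0, i]]
  | fuel + 1, i, el =>
    match PySem.List.pyGet? prev i with
    | none => el ++ [[0, i]]          -- Python: IndexError (excluded by Pre_)
    | some p =>
      if p ≥ 0 then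
        let edge := if i < p then [i, p] else [p, i]
        prev_to_EL_go prev fuel p (el ++ [edge])
      else el ++ [[0, i]]

def prev_to_EL (prev : List Int) : List (List Int) :=
  prev_to_EL_go prev prev.length ((prev.length : Int) - 1) []

-- ===== PORT B =====
-- Pass 1 of Source B: push the visited chain nodes on a stack.  The Python list used as a
-- LIFO stack (append at end / pop from end) is modelled exactly by cons at the head /
-- iterate from the head.
def prev_to_EL_push (prev : List Int) : Nat → Int → List Int → List Int × Int
  | 0, i, st => (st, i)
  | fuel + 1, i, st =>
    match PySem.List.pyGet? prev i with
    | none => (st, i)                 -- Python: IndexError (excluded by Pre_)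
    | some p => if p ≥ 0 then prev_to_EL_push prev fuel p (i :: st) else (st, i)

-- Pass 2 of Source B: pop the stack (head first), appending one min/max edge per node,
-- then reverse.  Each prev[j] re-read succeeded in pass 1, so pyGetD's default is inert.
def prev_to_EL_alt (prev : List Int) : List (List Int) :=
  let r := prev_to_EL_push prev prev.length ((prev.length : Int) - 1) []
  (r.1.foldl (fun rev j =>
      let p := PySem.List.pyGetD prev j 0
      rev ++ [[min j p, max j p]]) [[0, r.2]]).reverse

-- ===== PRECONDITION & SPEC =====
-- Pre_ excludes exactly the inputs where A does not return: the empty list (IndexError)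
-- and lists whose predecessor chain from the last node never reaches a negative entry
-- (an out-of-range link raises IndexError, a cycle loops forever). Stated via the
-- predecessor map: negative values are absorbing and out-of-range values stick, so the
-- chain terminates iff len iterations from len-1 land on a negative value.
def pvStep (prev : List Int) (j : Int) : Int :=
  if 0 ≤ j ∧ j < (prev.length : Int) then prev.getD j.toNat 0 else j
def Pre_prev_to_EL (prev : List Int) : Prop :=
  prev ≠ [] ∧ (pvStep prev)^[prev.length] ((prev.length : Int) - 1) < 0
instance (prev : List Int) : Decidable (Pre_prev_to_EL prev) := by
  unfold Pre_prev_to_EL; infer_instance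

def pvWitness_prev_to_EL : List Int := [-1, 0, 1, 0]

def Spec_prev_to_EL (prev : List Int) (out : List (List Int)) : Prop := out = prev_to_EL_alt prev
instance (prev : List Int) (out : List (List Int)) : Decidable (Spec_prev_to_EL prev out) := by unfold Spec_prev_to_EL; infer_instance

-- ===== CLAIM (what is proved, stated in full; the proofs are below) =====
def Claim_equal_prev_to_EL : Prop := ∀ (prev : List Int), Dom_prev_to_EL prev → Pre_prev_to_EL prev → Spec_prev_to_EL prev (prev_to_EL prev)

-- ===== LEMMAS AND PROOFS =====

-- proof-only middleman: the chain of nodes visited from i (front-first)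
def pvChain (prev : List Int) : Nat → Int → List Int
  | 0, i => [i]
  | fuel + 1, i =>
    match PySem.List.pyGet? prev i with
    | none => [i]
    | some p => if p ≥ 0 then i :: pvChain prev fuel p else [i]

theorem pvChain_ne_nil (prev : List Int) (fuel : Nat) (i : Int) :
    pvChain prev fuel i ≠ [] := by
  cases fuel with
  | zero => simp [pvChain]
  | succ f =>
    unfold pvChain
    cases h : PySem.List.pyGet? prev i with
    | none => simp
    | some p => by_cases hp : p ≥ 0 <;> simp [hp]

-- the per-node edge both programs emit
def pvEdge (prev : List Int) (j : Int) : List Int :=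
  let p := PySem.List.pyGetD prev j 0
  [min j p, max j p]

theorem pvEdge_of_get (prev : List Int) (i p : Int)
    (h : PySem.List.pyGet? prev i = some p) :
    pvEdge prev i = if i < p then [i, p] else [p, i] := by
  unfold pvEdge
  simp only [PySem.List.pyGetD, h, Option.getD_some]
  by_cases hlt : i < p
  · have h1 : min i p = i := by omega
    have h2 : max i p = p := by omega
    simp [hlt, h1, h2]
  · have h1 : min i p = p := by omega
    have h2 : max i p = i := by omega
    simp [hlt, h1, h2]

-- A's walk appends one pvEdge per non-last chain node, then the terminal edge
theorem go_eq_chain (prev : List Int) (fuel : Nat) (i : Int) (el : List (List Int)) :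
    prev_to_EL_go prev fuel i el =
      el ++ (pvChain prev fuel i).dropLast.map (pvEdge prev)
         ++ [[0, (pvChain prev fuel i).getLast!]] := by
  induction fuel generalizing i el with
  | zero => simp [prev_to_EL_go, pvChain]
  | succ f ih =>
    unfold prev_to_EL_go pvChain
    cases h : PySem.List.pyGet? prev i with
    | none => simp
    | some p =>
      by_cases hp : p ≥ 0
      · simp only [hp, if_true]
        rw [ih]
        have hne := pvChain_ne_nil prev f p
        rw [← pvEdge_of_get prev i p h]
        cases hc : pvChain prev f p with
        | nil => exact absurd hc hne
        | cons q rest =>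
          simp
      · simp [hp]

-- Pass 1 returns the reversed dropLast of the chain (on top of st) and its last node
theorem push_eq_chain (prev : List Int) (fuel : Nat) (i : Int) (st : List Int) :
    prev_to_EL_push prev fuel i st =
      ((pvChain prev fuel i).dropLast.reverse ++ st, (pvChain prev fuel i).getLast!) := by
  induction fuel generalizing i st with
  | zero => simp [prev_to_EL_push, pvChain]
  | succ f ih =>
    unfold prev_to_EL_push pvChain
    cases h : PySem.List.pyGet? prev i with
    | none => simp
    | some p =>
      by_cases hp : p ≥ 0
      · simp only [hp, if_true]
        rw [ih]
        have hne := pvChain_ne_nil prev f p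
        cases hc : pvChain prev f p with
        | nil => exact absurd hc hne
        | cons q rest => simp
      · simp [hp]

theorem foldl_edges (prev : List Int) (st : List Int) (init : List (List Int)) :
    st.foldl (fun rev j =>
      let p := PySem.List.pyGetD prev j 0
      rev ++ [[min j p, max j p]]) init = init ++ st.map (pvEdge prev) := by
  induction st generalizing init with
  | nil => simp
  | cons x xs ih => simp [ih, pvEdge]

-- ===== VERDICT (by name: the statement is the Claim_ definition above) =====
theorem prev_to_EL_spec : Claim_equal_prev_to_EL := by
  intro prev _ _
  unfold Spec_prev_to_EL prev_to_EL prev_to_EL_alt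
  rw [go_eq_chain, push_eq_chain]
  simp only [foldl_edges]
  simp
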